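-- pv_equiv track=rewrite | github.com/Isedehi/EVERGREEN-SCHOOL-FRONTDESK-CHATBOT | CHATBOT.py | match_response
-- ===== SOURCE A (Python) =====
-- def match_response(user_input, responses, max_threshold=5, min_threshold=1):
--     user_words = set(user_input.lower().split())
--
--     for threshold in range(max_threshold, min_threshold - 1, -1):
--         best_match = None
--         highest_score = 0
--
--         for keywords, reply in responses.items():
--             keyword_set = set(keywords.lower().split())
--             score = len(user_words & keyword_set)
--
--             if score > highest_score and score >= threshold:
--                 highest_score = score
--                 best_match = reply
--
--         if best_match:
--             return best_match
--
--     return "Sorry, I couldn't find a good match."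
-- ===== SOURCE B (Python) =====
-- def match_response(user_input, responses, max_threshold=5, min_threshold=1):
--     default = "Sorry, I couldn't find a good match."
--     if max_threshold < min_threshold:
--         return default
--     user_words = set(user_input.lower().split())
--     best_reply, best_score = None, 0
--     for keywords, reply in responses.items():
--         score = len(user_words & set(keywords.lower().split()))
--         if score > best_score:
--             best_reply, best_score = reply, score
--     if best_reply and best_score >= min_threshold:
--         return best_reply
--     return default
-- ===== Notes on version B (the rewrite author's own statement) =====
-- stated objective: simpler
-- what changed: Replaces the descending threshold-by-threshold rescan of all responses with a single scoring pass that keeps the first maximal-score reply, followed by one threshold comparison against min_threshold (plus an early empty-range check).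
import Mathlib
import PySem

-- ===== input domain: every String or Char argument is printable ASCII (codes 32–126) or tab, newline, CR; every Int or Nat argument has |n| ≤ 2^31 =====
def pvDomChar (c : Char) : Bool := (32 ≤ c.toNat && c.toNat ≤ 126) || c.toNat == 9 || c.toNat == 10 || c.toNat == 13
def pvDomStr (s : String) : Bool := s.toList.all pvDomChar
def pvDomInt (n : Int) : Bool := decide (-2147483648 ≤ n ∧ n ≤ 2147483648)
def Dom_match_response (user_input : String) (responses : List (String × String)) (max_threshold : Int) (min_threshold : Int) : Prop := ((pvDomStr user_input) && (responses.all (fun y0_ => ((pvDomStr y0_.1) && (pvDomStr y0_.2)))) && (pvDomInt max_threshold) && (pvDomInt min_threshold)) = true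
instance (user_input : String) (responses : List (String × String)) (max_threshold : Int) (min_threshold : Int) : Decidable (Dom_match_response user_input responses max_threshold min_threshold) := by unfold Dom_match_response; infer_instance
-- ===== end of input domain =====

-- B replaces A's descending threshold-by-threshold rescan of all responses with one scoring
-- pass keeping the first maximal-score reply, then a single threshold comparison (simpler).


-- ===== PORT A =====
-- score = len(user_words & set(keywords.lower().split())) (shared by both ports)
def pvScore (uw : PySem.Set String) (keywords : String) : Int :=
  PySem.Set.len (PySem.Set.inter uw (PySem.Set.ofList (PySem.Str.split₀ (PySem.Str.lower keywords))))

-- the inner 'for keywords, reply in responses.items()' loop at one threshold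
def pvInnerA (uw : PySem.Set String) (responses : List (String × String)) (threshold : Int) :
    Option String × Int :=
  responses.foldl
    (fun acc kr =>
      let score := pvScore uw kr.1
      if score > acc.2 ∧ score ≥ threshold then (some kr.2, score) else acc)
    (none, 0)

-- the outer 'for threshold in range(...)' loop; 'if best_match:' = some reply, reply ≠ ""
def pvLoopA (uw : PySem.Set String) (responses : List (String × String)) (d : String) :
    List Int → String
  | [] => d
  | t :: ts =>
    match (pvInnerA uw responses t).1 with
    | some reply => if reply ≠ "" then reply else pvLoopA uw responses d ts
    | none => pvLoopA uw responses d ts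

def match_response (user_input : String) (responses : List (String × String)) (max_threshold : Int) (min_threshold : Int) : String :=
  pvLoopA (PySem.Set.ofList (PySem.Str.split₀ (PySem.Str.lower user_input))) responses
    "Sorry, I couldn't find a good match."
    (PySem.List.pyRange max_threshold (min_threshold - 1) (-1))

-- ===== PORT B =====
-- B's single scoring pass: the 'for keywords, reply in responses.items()' loop of Source B,
-- returning (best_reply, best_score)
def pvBestB (uw : PySem.Set String) (responses : List (String × String)) : Option String × Int :=
  responses.foldl
    (fun acc kr =>
      let score := pvScore uw kr.1
      if score > acc.2 then (some kr.2, score) else acc)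
    (none, 0)

def match_response_alt (user_input : String) (responses : List (String × String)) (max_threshold : Int) (min_threshold : Int) : String :=
  if max_threshold < min_threshold then "Sorry, I couldn't find a good match."
  else
    match pvBestB (PySem.Set.ofList (PySem.Str.split₀ (PySem.Str.lower user_input))) responses with
    -- 'if best_reply and best_score >= min_threshold:'
    | (some r, best_score) =>
      if r ≠ "" ∧ best_score ≥ min_threshold then r else "Sorry, I couldn't find a good match."
    | (none, _) => "Sorry, I couldn't find a good match."

-- ===== PRECONDITION & SPEC =====
def Spec_match_response (user_input : String) (responses : List (String × String)) (max_threshold : Int) (min_threshold : Int) (out : String) : Prop := out = match_response_alt user_input responses max_threshold min_threshold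
instance (user_input : String) (responses : List (String × String)) (max_threshold : Int) (min_threshold : Int) (out : String) : Decidable (Spec_match_response user_input responses max_threshold min_threshold out) := by unfold Spec_match_response; infer_instance

-- ===== CLAIM (what is proved, stated in full; the proofs are below) =====
def Claim_equal_match_response : Prop := ∀ (user_input : String) (responses : List (String × String)) (max_threshold : Int) (min_threshold : Int), Dom_match_response user_input responses max_threshold min_threshold → Spec_match_response user_input responses max_threshold min_threshold (match_response user_input responses max_threshold min_threshold)

-- ===== LEMMAS AND PROOFS =====

lemma pvScore_nonneg (uw : PySem.Set String) (k : String) : 0 ≤ pvScore uw k := by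
  simp [pvScore, PySem.Set.len]

-- invariant of B's fold from a well-formed state: score stays ≥ 0, and reply is none iff score is 0
lemma pvBestB_inv (uw : PySem.Set String) (l : List (String × String)) :
    ∀ (b : Option String) (hb : Int), 0 ≤ hb → (b = none ↔ hb = 0) →
      0 ≤ (l.foldl (fun acc kr =>
            let score := pvScore uw kr.1
            if score > acc.2 then (some kr.2, score) else acc) (b, hb)).2 ∧
      ((l.foldl (fun acc kr =>
            let score := pvScore uw kr.1
            if score > acc.2 then (some kr.2, score) else acc) (b, hb)).1 = none ↔
       (l.foldl (fun acc kr =>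
            let score := pvScore uw kr.1
            if score > acc.2 then (some kr.2, score) else acc) (b, hb)).2 = 0) := by
  induction l with
  | nil => intro b hb h1 h2; simpa using ⟨h1, h2⟩
  | cons kr tl ih =>
    intro b hb h1 h2
    simp only [List.foldl_cons]
    by_cases hc : pvScore uw kr.1 > hb
    · simp only [hc, if_pos]
      exact ih (some kr.2) (pvScore uw kr.1) (le_of_lt (lt_of_le_of_lt h1 hc))
        (by constructor <;> intro h <;> [exact absurd h (by simp); omega])
    · simp only [hc]
      exact ih b hb h1 h2

-- A's inner loop at threshold t, started from the threshold filter of a well-formed B-state,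
-- equals the threshold filter of B's fold from that state
lemma pvInner_eq (uw : PySem.Set String) (t : Int) (l : List (String × String)) :
    ∀ (b : Option String) (hb : Int), 0 ≤ hb → (b = none ↔ hb = 0) →
      l.foldl (fun acc kr =>
          let score := pvScore uw kr.1
          if score > acc.2 ∧ score ≥ t then (some kr.2, score) else acc)
        (if t ≤ hb ∧ 0 < hb then (b, hb) else (none, 0)) =
      (fun p : Option String × Int => if t ≤ p.2 ∧ 0 < p.2 then p else (none, 0))
        (l.foldl (fun acc kr =>
            let score := pvScore uw kr.1
            if score > acc.2 then (some kr.2, score) else acc) (b, hb)) := by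
  induction l with
  | nil =>
    intro b hb h1 h2
    simp only [List.foldl_nil]
  | cons kr tl ih =>
    intro b hb h1 h2
    have hs : 0 ≤ pvScore uw kr.1 := pvScore_nonneg uw kr.1
    simp only [List.foldl_cons]
    by_cases hB : pvScore uw kr.1 > hb
    · -- B updates its state to (some reply, score)
      rw [if_pos hB]
      have key := ih (some kr.2) (pvScore uw kr.1) (by omega)
        (by constructor <;> intro h <;> [exact absurd h (by simp); omega])
      by_cases ht : pvScore uw kr.1 ≥ t
      · -- A updates too: its state's score component is ≤ hb < score
        have hA : pvScore uw kr.1 > (if t ≤ hb ∧ 0 < hb then (b, hb) else ((none : Option String), (0:Int))).2 ∧ pvScore uw kr.1 ≥ t := by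
          refine ⟨?_, ht⟩
          by_cases hc : t ≤ hb ∧ 0 < hb
          · rw [if_pos hc]; exact hB
          · rw [if_neg hc]; simpa using lt_of_le_of_lt h1 hB
        rw [if_pos hA]
        rw [if_pos (show t ≤ pvScore uw kr.1 ∧ 0 < pvScore uw kr.1 by omega)] at key
        exact key
      · -- A does not update (score < t); its state must already be (none, 0)
        have hA : ¬ (pvScore uw kr.1 > (if t ≤ hb ∧ 0 < hb then (b, hb) else ((none : Option String), (0:Int))).2 ∧ pvScore uw kr.1 ≥ t) := by
          intro h; exact ht h.2
        rw [if_neg hA]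
        rw [if_neg (show ¬ (t ≤ pvScore uw kr.1 ∧ 0 < pvScore uw kr.1) by intro h; exact ht h.1)] at key
        rw [if_neg (show ¬ (t ≤ hb ∧ 0 < hb) by intro h; omega)]
        exact key
    · -- B does not update; neither does A
      rw [if_neg hB]
      have hA : ¬ (pvScore uw kr.1 > (if t ≤ hb ∧ 0 < hb then (b, hb) else ((none : Option String), (0:Int))).2 ∧ pvScore uw kr.1 ≥ t) := by
        by_cases hc : t ≤ hb ∧ 0 < hb
        · rw [if_pos hc]; intro h; exact absurd h.1 (by simpa using not_lt.mpr (not_lt.mp hB))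
        · rw [if_neg hc]
          intro h
          exact hc ⟨le_trans h.2 (by omega), by omega⟩
      rw [if_neg hA]
      exact ih b hb h1 h2

-- A's inner loop from its real initial state (none, 0)
lemma pvInnerA_char (uw : PySem.Set String) (responses : List (String × String)) (t : Int) :
    pvInnerA uw responses t =
      (if t ≤ (pvBestB uw responses).2 ∧ 0 < (pvBestB uw responses).2
        then pvBestB uw responses else (none, 0)) := by
  have h := pvInner_eq uw t responses none 0 le_rfl (by simp)
  rw [if_neg (by omega)] at h
  simpa [pvInnerA, pvBestB] using h

-- the outer loop returns the default when no threshold produces a truthy best_match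
lemma pvLoopA_default (uw : PySem.Set String) (responses : List (String × String)) (d : String)
    (ts : List Int)
    (h : ∀ t ∈ ts, (pvInnerA uw responses t).1 = none ∨ (pvInnerA uw responses t).1 = some "") :
    pvLoopA uw responses d ts = d := by
  induction ts with
  | nil => rfl
  | cons t ts ih =>
    have ht := h t (by simp)
    rcases ht with ht | ht <;>
      simp [pvLoopA, ht, ih (fun u hu => h u (by simp [hu]))]
  -- in the 'some ""' case the 'if best_match:' test is falsy and the loop continues

-- the outer loop returns r once some threshold in the list yields best_match = some r ≠ ""
lemma pvLoopA_found (uw : PySem.Set String) (responses : List (String × String)) (d : String)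
    (r : String) (hr : r ≠ "") (t0 : Int) (ts : List Int) (ht0 : t0 ∈ ts)
    (h0 : (pvInnerA uw responses t0).1 = some r)
    (h : ∀ t ∈ ts, (pvInnerA uw responses t).1 = none ∨ (pvInnerA uw responses t).1 = some r) :
    pvLoopA uw responses d ts = r := by
  induction ts with
  | nil => cases ht0
  | cons t ts ih =>
    rcases h t (by simp) with ht | ht
    · simp only [pvLoopA, ht]
      have : t0 ∈ ts := by
        rcases List.mem_cons.mp ht0 with rfl | h'
        · rw [h0] at ht; cases ht
        · exact h'
      exact ih this (fun u hu => h u (by simp [hu]))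
    · simp [pvLoopA, ht, hr]

-- ===== VERDICT (by name: the statement is the Claim_ definition above) =====
theorem match_response_spec : Claim_equal_match_response := by
  intro user_input responses max_threshold min_threshold _hdom
  unfold Spec_match_response match_response match_response_alt
  set uw := PySem.Set.ofList (PySem.Str.split₀ (PySem.Str.lower user_input)) with huw
  set d := "Sorry, I couldn't find a good match." with hd
  by_cases hrange : max_threshold < min_threshold
  · -- empty range: A's outer loop runs zero times
    rw [PySem.List.pyRange_neg_one_eq_nil (by omega)]
    simp [pvLoopA, hrange]
  · rw [if_neg hrange]
    have hinv := pvBestB_inv uw responses none 0 le_rfl (by simp)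
    obtain ⟨hpos, hnone⟩ : 0 ≤ (pvBestB uw responses).2 ∧
        ((pvBestB uw responses).1 = none ↔ (pvBestB uw responses).2 = 0) := hinv
    match h1 : pvBestB uw responses with
    | (none, sc) =>
      -- no response scored > 0: every inner loop finds nothing
      rw [h1] at hpos hnone
      have h2 : sc = 0 := by simpa using hnone
      apply pvLoopA_default
      intro t _
      rw [pvInnerA_char uw responses t, h1]
      simp only [h2]
      rw [if_neg (by omega)]
      simp
    | (some r, sc) =>
      rw [h1] at hpos hnone
      have h2 : 0 < sc := by
        rcases lt_or_eq_of_le hpos with h | h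
        · exact h
        · exact absurd (hnone.mpr h.symm) (by simp)
      have hchar : ∀ t, (pvInnerA uw responses t).1 = none ∨ (pvInnerA uw responses t).1 = some r := by
        intro t
        rw [pvInnerA_char uw responses t, h1]
        by_cases hc : t ≤ sc ∧ 0 < sc
        · right; rw [if_pos hc]
        · left; rw [if_neg hc]
      by_cases hmn : r ≠ "" ∧ sc ≥ min_threshold
      · -- B returns r; A finds it at threshold min(max_threshold, best score)
        show pvLoopA uw responses d _ = if r ≠ "" ∧ sc ≥ min_threshold then r else d
        rw [if_pos hmn]
        apply pvLoopA_found uw responses d r hmn.1 (min max_threshold sc)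
        · rw [PySem.List.mem_pyRange_neg_one]
          constructor <;> omega
        · rw [pvInnerA_char uw responses (min max_threshold sc), h1]
          rw [if_pos ⟨min_le_right _ _, h2⟩]
        · intro t _; exact hchar t
      · show pvLoopA uw responses d _ = if r ≠ "" ∧ sc ≥ min_threshold then r else d
        rw [if_neg hmn]
        rcases not_and_or.mp hmn with he | hlt
        · -- best reply is "": falsy in A, every pass falls through
          push Not at he
          apply pvLoopA_default
          intro t _
          rcases hchar t with h | h
          · exact Or.inl h
          · exact Or.inr (he ▸ h)
        · -- best score below min_threshold: no threshold in the range is met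
          apply pvLoopA_default
          intro t ht
          rw [PySem.List.mem_pyRange_neg_one] at ht
          left
          rw [pvInnerA_char uw responses t, h1, if_neg (by omega)]
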